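-- pv_equiv track=rewrite | github.com/eweitz/ideogram | scripts/python/cache/clinvar_cache.py | get_is_relevant
-- ===== SOURCE A (Python) =====
-- clinical_concerns = ['Likely_pathogenic', 'Pathogenic/Likely_pathogenic', 'Pathogenic']
--
-- robust_review_statuses = [
--     'criteria_provided,_multiple_submitters,_no_conflicts',
--     'reviewed_by_expert_panel',
--     'practice_guideline'
-- ]
--
-- def get_is_relevant(fields):
--     is_clinical_concern = False
--     is_robustly_reviewed = False
--     for field in fields:
--         [name, value] = field.split('=')
--
--         if name == 'CLNSIG' and value in clinical_concerns:
--             is_clinical_concern = True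
--
--         if name == 'CLNREVSTAT' and value in robust_review_statuses:
--             is_robustly_reviewed = True
--
--     return is_clinical_concern and is_robustly_reviewed
-- ===== SOURCE B (Python) =====
-- clinical_concerns = ['Likely_pathogenic', 'Pathogenic/Likely_pathogenic', 'Pathogenic']
--
-- robust_review_statuses = [
--     'criteria_provided,_multiple_submitters,_no_conflicts',
--     'reviewed_by_expert_panel',
--     'practice_guideline'
-- ]
--
-- # Precomputed sets of the relevant (name, value) pairs.
-- SIG_PAIRS = {('CLNSIG', value) for value in clinical_concerns}
-- REV_PAIRS = {('CLNREVSTAT', value) for value in robust_review_statuses}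
--
-- def get_is_relevant(fields):
--     parsed = {(name, value) for name, value in (field.split('=') for field in fields)}
--     return not parsed.isdisjoint(SIG_PAIRS) and not parsed.isdisjoint(REV_PAIRS)
-- ===== Notes on version B (the rewrite author's own statement) =====
-- stated objective: alternative
-- what changed: A threads two boolean flags through a loop with per-field string comparisons and list-membership tests; B parses the fields once into a hash set of (name, value) pairs and answers by two set-disjointness tests against precomputed relevant pair sets — no flags, no per-field conditionals.
import Mathlib
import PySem

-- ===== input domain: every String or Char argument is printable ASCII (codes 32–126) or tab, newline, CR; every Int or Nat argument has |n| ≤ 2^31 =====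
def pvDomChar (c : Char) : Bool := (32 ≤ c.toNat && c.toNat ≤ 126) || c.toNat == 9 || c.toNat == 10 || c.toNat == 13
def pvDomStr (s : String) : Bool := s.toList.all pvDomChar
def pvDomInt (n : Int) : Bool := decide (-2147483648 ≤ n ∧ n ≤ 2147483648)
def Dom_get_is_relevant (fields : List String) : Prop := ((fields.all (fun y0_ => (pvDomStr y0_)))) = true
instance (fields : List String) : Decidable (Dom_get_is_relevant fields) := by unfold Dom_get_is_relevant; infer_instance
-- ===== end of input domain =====

-- B replaces A's flag-threading loop with per-field comparisons by set algebra: a hash set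
-- of the parsed (name, value) pairs tested for disjointness against precomputed pair sets.

def clinical_concerns : List String :=
  ["Likely_pathogenic", "Pathogenic/Likely_pathogenic", "Pathogenic"]

def robust_review_statuses : List String :=
  ["criteria_provided,_multiple_submitters,_no_conflicts",
   "reviewed_by_expert_panel",
   "practice_guideline"]

-- ===== PORT A =====
-- fold threading (is_clinical_concern, is_robustly_reviewed); the non-2-part split case
-- raises ValueError in Python and is excluded by Pre_ (fallback keeps the state).
def get_is_relevant (fields : List String) : Bool :=
  let st := fields.foldl (fun st field =>
    match (PySem.Str.split? field "=").getD [] with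
    | [name, value] =>
      let st := if name == "CLNSIG" && clinical_concerns.contains value then (true, st.2) else st
      if name == "CLNREVSTAT" && robust_review_statuses.contains value then (st.1, true) else st
    | _ => st) (false, false)
  st.1 && st.2

-- ===== PORT B =====
def SIG_PAIRS : PySem.Set (String × String) :=
  PySem.Set.ofList (clinical_concerns.map (fun value => ("CLNSIG", value)))

def REV_PAIRS : PySem.Set (String × String) :=
  PySem.Set.ofList (robust_review_statuses.map (fun value => ("CLNREVSTAT", value)))

-- the (name, value) unpacking of B's comprehension: raises ValueError on a non-2-part
-- split in Python (excluded by Pre_); the fallback pair only keeps the port total.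
def pvPair (field : String) : String × String :=
  let parts := (PySem.Str.split? field "=").getD []
  (parts.headD "", (parts.drop 1).headD "")

def get_is_relevant_alt (fields : List String) : Bool :=
  let parsed := PySem.Set.ofList (fields.map pvPair)
  !(PySem.Set.isdisjoint parsed SIG_PAIRS) && !(PySem.Set.isdisjoint parsed REV_PAIRS)

-- ===== PRECONDITION & SPEC =====
-- Pre_ excludes fields whose split('=') does not give exactly two parts: there the
-- [name, value] unpacking raises ValueError (in A's loop and in B's comprehension alike).
def Pre_get_is_relevant (fields : List String) : Prop :=
  ∀ f ∈ fields, ((PySem.Str.split? f "=").getD []).length = 2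
instance (fields : List String) : Decidable (Pre_get_is_relevant fields) := by
  unfold Pre_get_is_relevant; infer_instance
def pvWitness_get_is_relevant : List String :=
  ["CLNSIG=Pathogenic", "CLNREVSTAT=practice_guideline"]

def Spec_get_is_relevant (fields : List String) (out : Bool) : Prop := out = get_is_relevant_alt fields
instance (fields : List String) (out : Bool) : Decidable (Spec_get_is_relevant fields out) := by unfold Spec_get_is_relevant; infer_instance

-- ===== CLAIM (what is proved, stated in full; the proofs are below) =====
def Claim_equal_get_is_relevant : Prop := ∀ (fields : List String), Dom_get_is_relevant fields → Pre_get_is_relevant fields → Spec_get_is_relevant fields (get_is_relevant fields)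

-- ===== LEMMAS AND PROOFS =====

-- the per-field predicates A's loop tests
def pvP1 (f : String) : Bool :=
  match (PySem.Str.split? f "=").getD [] with
  | [name, value] => name == "CLNSIG" && clinical_concerns.contains value
  | _ => false

def pvP2 (f : String) : Bool :=
  match (PySem.Str.split? f "=").getD [] with
  | [name, value] => name == "CLNREVSTAT" && robust_review_statuses.contains value
  | _ => false

theorem pvStep_eq (st : Bool × Bool) (field : String) :
    (match (PySem.Str.split? field "=").getD [] with
     | [name, value] =>
       let st' := if name == "CLNSIG" && clinical_concerns.contains value then (true, st.2) else st
       if name == "CLNREVSTAT" && robust_review_statuses.contains value then (st'.1, true) else st'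
     | _ => st)
    = (st.1 || pvP1 field, st.2 || pvP2 field) := by
  unfold pvP1 pvP2
  rcases h : (PySem.Str.split? field "=").getD [] with _ | ⟨n, _ | ⟨v, _ | _⟩⟩ <;> simp_all
  split_ifs <;> simp_all [Prod.ext_iff]

theorem pvFold_eq (fields : List String) (c r : Bool) :
    fields.foldl (fun st field =>
      match (PySem.Str.split? field "=").getD [] with
      | [name, value] =>
        let st' := if name == "CLNSIG" && clinical_concerns.contains value then (true, st.2) else st
        if name == "CLNREVSTAT" && robust_review_statuses.contains value then (st'.1, true) else st'
      | _ => st) (c, r)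
    = (c || fields.any pvP1, r || fields.any pvP2) := by
  induction fields generalizing c r with
  | nil => simp
  | cons f fs ih =>
    simp only [List.foldl_cons, pvStep_eq (c, r) f, ih, List.any_cons]
    simp [Bool.or_assoc]

-- under the exactly-two-parts hypothesis, A's per-field test is "the parsed pair is relevant"
theorem pvP1_iff (f : String) (hf : ((PySem.Str.split? f "=").getD []).length = 2) :
    pvP1 f = true ↔ pvPair f ∈ clinical_concerns.map (fun value => ("CLNSIG", value)) := by
  unfold pvP1 pvPair
  rcases hs : (PySem.Str.split? f "=").getD [] with _ | ⟨n, _ | ⟨v, _ | _⟩⟩ <;>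
    rw [hs] at hf <;> simp at hf
  show (n == "CLNSIG" && clinical_concerns.contains v) = true ↔ _
  constructor
  · intro h
    obtain ⟨hn, hv⟩ := Bool.and_eq_true_iff.mp h
    rw [beq_iff_eq] at hn
    subst hn
    exact List.mem_map_of_mem (by simpa using hv)
  · intro h
    obtain ⟨c, hc, hpair⟩ := List.mem_map.mp h
    cases hpair
    simpa using hc

theorem pvP2_iff (f : String) (hf : ((PySem.Str.split? f "=").getD []).length = 2) :
    pvP2 f = true ↔ pvPair f ∈ robust_review_statuses.map (fun value => ("CLNREVSTAT", value)) := by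
  unfold pvP2 pvPair
  rcases hs : (PySem.Str.split? f "=").getD [] with _ | ⟨n, _ | ⟨v, _ | _⟩⟩ <;>
    rw [hs] at hf <;> simp at hf
  show (n == "CLNREVSTAT" && robust_review_statuses.contains v) = true ↔ _
  constructor
  · intro h
    obtain ⟨hn, hv⟩ := Bool.and_eq_true_iff.mp h
    rw [beq_iff_eq] at hn
    subst hn
    exact List.mem_map_of_mem (by simpa using hv)
  · intro h
    obtain ⟨c, hc, hpair⟩ := List.mem_map.mp h
    cases hpair
    simpa using hc

-- ===== VERDICT (by name: the statement is the Claim_ definition above) =====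
theorem get_is_relevant_spec : Claim_equal_get_is_relevant := by
  intro fields _ hpre
  unfold Spec_get_is_relevant get_is_relevant get_is_relevant_alt
  simp only [pvFold_eq fields false false, Bool.false_or]
  rw [Bool.eq_iff_iff]
  simp only [Bool.and_eq_true, List.any_eq_true, Bool.not_eq_eq_eq_not, Bool.not_true]
  have hmem : ∀ p, p ∈ PySem.Set.ofList (fields.map pvPair) ↔ ∃ f ∈ fields, pvPair f = p := by
    intro p
    rw [PySem.Set.mem_ofList, List.mem_map]
  constructor
  · rintro ⟨⟨f1, hf1, hp1⟩, ⟨f2, hf2, hp2⟩⟩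
    constructor
    · rw [← Bool.not_eq_true, PySem.Set.isdisjoint_iff]
      push Not
      exact ⟨pvPair f1, (hmem _).mpr ⟨f1, hf1, rfl⟩,
        by simpa [SIG_PAIRS, PySem.Set.mem_ofList] using (pvP1_iff f1 (hpre f1 hf1)).mp hp1⟩
    · rw [← Bool.not_eq_true, PySem.Set.isdisjoint_iff]
      push Not
      exact ⟨pvPair f2, (hmem _).mpr ⟨f2, hf2, rfl⟩,
        by simpa [REV_PAIRS, PySem.Set.mem_ofList] using (pvP2_iff f2 (hpre f2 hf2)).mp hp2⟩
  · rintro ⟨h1, h2⟩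
    rw [← Bool.not_eq_true, PySem.Set.isdisjoint_iff] at h1 h2
    push Not at h1 h2
    obtain ⟨p1, hin1, hm1⟩ := h1
    obtain ⟨p2, hin2, hm2⟩ := h2
    obtain ⟨f1, hf1, hpf1⟩ := (hmem _).mp hin1
    obtain ⟨f2, hf2, hpf2⟩ := (hmem _).mp hin2
    refine ⟨⟨f1, hf1, ?_⟩, ⟨f2, hf2, ?_⟩⟩
    · rw [pvP1_iff f1 (hpre f1 hf1), hpf1]
      simpa [SIG_PAIRS, PySem.Set.mem_ofList] using hm1
    · rw [pvP2_iff f2 (hpre f2 hf2), hpf2]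
      simpa [REV_PAIRS, PySem.Set.mem_ofList] using hm2
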